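-- pv_equiv track=rewrite | github.com/loscrossos/crossos_pynst | crossos_pynst.py | is_valid_version_format
-- ===== SOURCE A (Python) =====
-- def is_valid_version_format(version: str) -> bool:
--     """
--     Validates if a string is formatted like a software version number.
--     Examples: '3', '3.22', '3.22.22'
--
--     Args:
--         version (str): The string to validate
--
--     Returns:
--         bool: True if the string is a valid version number format, False otherwise
--     """
--     # Check if string is empty or contains non-numeric/non-dot characters
--     if not version or not all(c.isdigit() or c == '.' for c in version):
--         return False
--
--     # Split by dots
--     parts = version.split('.')
--
--     # Check if there's at least one part and no empty parts
--     if not parts or '' in parts: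
--         return False
--
--     # Check if all parts are numeric
--     try:
--         return all(part.isdigit() for part in parts)
--     except ValueError:
--         return False
-- ===== SOURCE B (Python) =====
-- def is_valid_version_format(version: str) -> bool:
--     """Validate a dotted version string without building a parts list:
--     reject empty parts by adjacency (a leading dot, a trailing dot, or two consecutive dots),
--     then require every character to be a digit or a dot."""
--     if not version or version[0] == '.' or version[-1] == '.' or '..' in version:
--         return False
--     return all(c.isdigit() or c == '.' for c in version)
-- ===== Notes on version B (the rewrite author's own statement) =====
-- stated objective: simpler
-- what changed: B never splits the string: it detects empty parts by adjacency (a leading dot, a trailing dot, or two consecutive dots) and then checks every character is a digit or a dot, instead of A's split-by-dot plus per-part isdigit scan.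
import Mathlib
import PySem

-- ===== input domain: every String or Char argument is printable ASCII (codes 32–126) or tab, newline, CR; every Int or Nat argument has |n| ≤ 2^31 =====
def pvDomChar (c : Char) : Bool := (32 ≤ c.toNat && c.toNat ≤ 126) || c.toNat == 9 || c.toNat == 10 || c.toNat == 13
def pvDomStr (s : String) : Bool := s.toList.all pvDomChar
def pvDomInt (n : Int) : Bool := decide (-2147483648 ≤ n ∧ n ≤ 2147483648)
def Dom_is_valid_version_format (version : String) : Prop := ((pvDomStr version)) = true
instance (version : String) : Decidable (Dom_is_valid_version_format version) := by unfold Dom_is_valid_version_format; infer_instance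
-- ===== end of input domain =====

-- B validates without splitting: empty parts are detected by adjacency (a leading dot, a trailing
-- dot, or two consecutive dots), then every character must be a digit or a dot — simpler, no parts list.

-- ===== PORT A =====
def is_valid_version_format (version : String) : Bool :=
  let cs := version.toList
  if cs.isEmpty || !(cs.all fun c => PySem.Chars.isdigit c || c == '.') then false
  else
    let parts := PySem.Chars.splitOn cs ['.']
    if parts.isEmpty || parts.contains [] then false
    else parts.all (fun p => PySem.Chars.strIsdigit p)

-- ===== PORT B =====
def is_valid_version_format_alt (version : String) : Bool :=
  let cs := version.toList
  if cs.isEmpty || PySem.List.pyGet? cs 0 == some '.' || PySem.List.pyGet? cs (-1) == some '.'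
      || PySem.Chars.isIn ['.', '.'] cs then false
  else cs.all fun c => PySem.Chars.isdigit c || c == '.'

-- ===== PRECONDITION & SPEC =====
def Spec_is_valid_version_format (version : String) (out : Bool) : Prop := out = is_valid_version_format_alt version
instance (version : String) (out : Bool) : Decidable (Spec_is_valid_version_format version out) := by unfold Spec_is_valid_version_format; infer_instance

-- ===== CLAIM (what is proved, stated in full; the proofs are below) =====
def Claim_equal_is_valid_version_format : Prop := ∀ (version : String), Dom_is_valid_version_format version → Spec_is_valid_version_format version (is_valid_version_format version)

-- ===== LEMMAS AND PROOFS =====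

/-- Reference version of split on a single dot: `pre` is the part accumulated so far. -/
def splitDot (pre : List Char) : List Char → List (List Char)
  | [] => [pre]
  | c :: rest => if c = '.' then pre :: splitDot [] rest else splitDot (pre ++ [c]) rest

theorem go_eq_splitDot : ∀ (fuel : Nat) (l cur : List Char) (acc : List (List Char)),
    l.length ≤ fuel →
    PySem.Chars.splitOn.go ['.'] fuel l cur acc = acc.reverse ++ splitDot cur.reverse l := by
  intro fuel
  induction fuel with
  | zero =>
    intro l cur acc h
    have : l = [] := by cases l <;> simp_all
    subst this
    simp [PySem.Chars.splitOn.go, splitDot]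
  | succ n ih =>
    intro l cur acc h
    cases l with
    | nil => simp [PySem.Chars.splitOn.go, splitDot]
    | cons c rest =>
      by_cases hc : c = '.'
      · subst hc
        have hpre : List.isPrefixOf ['.'] ('.' :: rest) = true := by
          simp [List.isPrefixOf]
        rw [PySem.Chars.splitOn.go]
        simp only [hpre, if_pos, List.length_cons, List.length_nil, List.drop_succ_cons,
          List.drop_zero]
        rw [ih rest [] (cur.reverse :: acc) (by simpa using Nat.le_of_succ_le_succ h)]
        simp [splitDot]
      · have hpre : List.isPrefixOf ['.'] (c :: rest) = false := by
          simp [List.isPrefixOf]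
          exact fun h => hc h.symm
        rw [PySem.Chars.splitOn.go]
        simp only [hpre, Bool.false_eq_true, if_neg, not_false_iff]
        rw [ih rest (c :: cur) acc (by simpa using Nat.le_of_succ_le_succ h)]
        simp [splitDot, hc]

theorem splitOn_eq_splitDot (cs : List Char) :
    PySem.Chars.splitOn cs ['.'] = splitDot [] cs := by
  unfold PySem.Chars.splitOn
  rw [go_eq_splitDot (cs.length + 1) cs [] [] (by omega)]
  simp

theorem splitDot_ne_nil (pre l : List Char) : splitDot pre l ≠ [] := by
  induction l generalizing pre with
  | nil => simp [splitDot]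
  | cons c rest ih => by_cases hc : c = '.' <;> simp [splitDot, hc, ih]

theorem getLast?_cons_ne_nil (c : Char) (l : List Char) (h : l ≠ []) :
    (c :: l).getLast? = l.getLast? := by
  cases l with
  | nil => exact absurd rfl h
  | cons d tl => rfl

/-- Parts are all nonempty digit-strings iff no leading dot, no trailing dot, no double dot, given
all characters are digits or dots and the accumulated `pre` is all digits. -/
theorem splitDot_all_isdigit (l : List Char) : ∀ (pre : List Char),
    (∀ c ∈ pre, PySem.Chars.isdigit c = true) →
    (∀ c ∈ l, PySem.Chars.isdigit c = true ∨ c = '.') →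
    ((splitDot pre l).all PySem.Chars.strIsdigit = true ↔
      ((pre ≠ [] ∨ (l ≠ [] ∧ l.head? ≠ some '.')) ∧ (l ≠ [] → l.getLast? ≠ some '.')
        ∧ ¬ ['.', '.'] <:+: l)) := by
  induction l with
  | nil =>
    intro pre hpre _
    simp only [splitDot, List.all_cons, List.all_nil, Bool.and_true]
    constructor
    · intro h
      refine ⟨Or.inl ?_, by simp, by simp⟩
      intro hnil; subst hnil
      simp [PySem.Chars.strIsdigit] at h
    · rintro ⟨h1, -, -⟩
      have hne : pre ≠ [] := by
        rcases h1 with h | h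
        · exact h
        · exact absurd rfl h.1
      simp [PySem.Chars.strIsdigit, hne, List.all_eq_true]
      exact hpre
  | cons c rest ih =>
    intro pre hpre hl
    have hrest : ∀ x ∈ rest, PySem.Chars.isdigit x = true ∨ x = '.' := by
      intro x hx; exact hl x (List.mem_cons_of_mem _ hx)
    by_cases hc : c = '.'
    · subst hc
      rw [show splitDot pre ('.' :: rest) = pre :: splitDot [] rest from by simp [splitDot]]
      simp only [List.all_cons, Bool.and_eq_true]
      rw [ih [] (by simp) hrest]
      have hinfix : (['.', '.'] <:+: ('.' :: rest)) ↔
          (rest.head? = some '.' ∨ ['.', '.'] <:+: rest) := by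
        rw [List.infix_cons_iff]
        constructor
        · rintro (h | h)
          · left
            rcases h with ⟨t, ht⟩
            cases rest with
            | nil => simp at ht
            | cons d tl => simp at ht; simp [ht.1.symm]
          · right; exact h
        · rintro (h | h)
          · left
            cases rest with
            | nil => simp at h
            | cons d tl =>
              simp at h; subst h
              exact ⟨tl, rfl⟩
          · right; exact h
      constructor
      · rintro ⟨h0, h1, h2, h3⟩
        have hprene : pre ≠ [] := by
          intro hnil; subst hnil; simp [PySem.Chars.strIsdigit] at h0
        have hrestne : rest ≠ [] := (h1.resolve_left (by simp)).1
        refine ⟨Or.inl hprene, ?_, ?_⟩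
        · intro _
          rw [getLast?_cons_ne_nil _ _ hrestne]
          exact h2 hrestne
        · rw [hinfix]
          rintro (h | h)
          · rcases h1 with h1 | h1
            · simp at h1
            · exact absurd h h1.2
          · exact h3 h
      · rintro ⟨h1, h2, h3⟩
        rw [hinfix] at h3
        push_neg at h3
        have hprene : pre ≠ [] := by
          rcases h1 with h | h
          · exact h
          · simp at h
        have hrestne : rest ≠ [] := by
          intro hnil; subst hnil
          exact h2 (by simp) (by simp)
        refine ⟨?_, Or.inr ⟨hrestne, h3.1⟩, ?_, h3.2⟩
        · simp [PySem.Chars.strIsdigit, hprene, List.all_eq_true]; exact hpre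
        · intro _
          have := h2 (by simp)
          rwa [getLast?_cons_ne_nil _ _ hrestne] at this
    · have hcd : PySem.Chars.isdigit c = true :=
        (hl c (List.mem_cons_self)).resolve_right hc
      simp only [splitDot, if_neg hc]
      rw [ih (pre ++ [c]) (by
        intro x hx
        rcases List.mem_append.mp hx with h | h
        · exact hpre x h
        · simp at h; subst h; exact hcd) hrest]
      have hinfix : (['.', '.'] <:+: (c :: rest)) ↔ ['.', '.'] <:+: rest := by
        rw [List.infix_cons_iff]
        constructor
        · rintro (⟨t, ht⟩ | h)
          · exfalso; simp at ht; exact hc ht.1.symm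
          · exact h
        · exact Or.inr
      constructor
      · rintro ⟨-, h2, h3⟩
        refine ⟨Or.inr ⟨by simp, by simp [hc]⟩, ?_, ?_⟩
        · intro _
          cases rest with
          | nil => simp [hc]
          | cons d tl =>
            rw [getLast?_cons_ne_nil _ _ (by simp : (d :: tl) ≠ [])]
            exact h2 (by simp)
        · rw [hinfix]; exact h3
      · rintro ⟨-, h2, h3⟩
        refine ⟨Or.inl (by simp), ?_, ?_⟩
        · intro hrne
          have := h2 (by simp)
          rwa [getLast?_cons_ne_nil _ _ hrne] at this
        · rw [← hinfix]; exact h3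

theorem is_valid_version_format_spec : Claim_equal_is_valid_version_format := by
  intro version _
  unfold Spec_is_valid_version_format is_valid_version_format is_valid_version_format_alt
  set cs := version.toList with hcs
  cases hn : cs with
  | nil => simp
  | cons c0 rest =>
    by_cases hall : (cs.all fun c => PySem.Chars.isdigit c || c == '.') = true
    · rw [hn] at hall
      simp only [hn, List.isEmpty_cons, hall, Bool.not_true, Bool.or_false, Bool.false_or,
        Bool.false_eq_true, if_false]
      -- A side: reduce to parts.all strIsdigit
      rw [splitOn_eq_splitDot]
      have hpne := splitDot_ne_nil [] (c0 :: rest)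
      have hA : (if ((splitDot [] (c0 :: rest)).isEmpty
              || (splitDot [] (c0 :: rest)).contains []) = true then false
          else (splitDot [] (c0 :: rest)).all fun p => PySem.Chars.strIsdigit p)
          = (splitDot [] (c0 :: rest)).all PySem.Chars.strIsdigit := by
        by_cases hco : (splitDot [] (c0 :: rest)).contains [] = true
        · have hf : (splitDot [] (c0 :: rest)).all PySem.Chars.strIsdigit = false := by
            rw [List.all_eq_false]
            exact ⟨[], by simpa using hco, by simp [PySem.Chars.strIsdigit]⟩
          simp [hco, hf]
        · simp [List.isEmpty_eq_false_iff.mpr hpne, hco]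
          intro _
          simpa using hco
      rw [hA]
      -- B side conditions
      have hget0 : PySem.List.pyGet? (c0 :: rest) 0 = some c0 := by
        simp [PySem.List.pyGet?_zero]
      have hkey := splitDot_all_isdigit (c0 :: rest) [] (by simp)
        (by
          intro x hx
          have := List.all_eq_true.mp hall x hx
          simp only [Bool.or_eq_true, beq_iff_eq] at this
          exact this)
      by_cases hbad : (c0 = '.' ∨ (c0 :: rest).getLast? = some '.'
          ∨ ['.', '.'] <:+: (c0 :: rest))
      · have hAfalse : (splitDot [] (c0 :: rest)).all PySem.Chars.strIsdigit = false := by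
          rw [← Bool.not_eq_true, hkey]
          rintro ⟨h1, h2, h3⟩
          rcases hbad with h | h | h
          · exact absurd (by simp [h]) ((h1.resolve_left (by simp)).2)
          · exact absurd (h2 (by simp)) (by simp [h])
          · exact h3 h
        rw [hAfalse]
        have : (PySem.List.pyGet? (c0 :: rest) 0 == some '.'
            || PySem.List.pyGet? (c0 :: rest) (-1) == some '.'
            || PySem.Chars.isIn ['.', '.'] (c0 :: rest)) = true := by
          rcases hbad with h | h | h
          · simp [hget0, h]
          · simp [PySem.List.pyGet?_neg_one, h]
          · simp [(PySem.Chars.isIn_iff_infix _ _).mpr h]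
        rw [this]
        simp
      · push_neg at hbad
        have hAtrue : (splitDot [] (c0 :: rest)).all PySem.Chars.strIsdigit = true := by
          rw [hkey]
          exact ⟨Or.inr ⟨by simp, by simp [hbad.1]⟩, fun _ => by simp [hbad.2.1], hbad.2.2⟩
        rw [hAtrue]
        have : (PySem.List.pyGet? (c0 :: rest) 0 == some '.'
            || PySem.List.pyGet? (c0 :: rest) (-1) == some '.'
            || PySem.Chars.isIn ['.', '.'] (c0 :: rest)) = false := by
          simp only [Bool.or_eq_false_iff]
          refine ⟨⟨by simp [hget0, hbad.1], ?_⟩, ?_⟩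
          · simp [PySem.List.pyGet?_neg_one, hbad.2.1]
          · rw [← Bool.not_eq_true, PySem.Chars.isIn_iff_infix]; exact hbad.2.2
        rw [this]
        simp [hall]
    · -- some character is not digit-or-dot: both sides false
      rw [hn] at hall
      simp only [hn, List.isEmpty_cons, Bool.false_or]
      rw [Bool.not_eq_true] at hall
      simp [hall]
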